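-- pv_equiv track=rewrite | github.com/galezon/TheoryAlgorithms | 5Sucipto_Lunkyadi.py | vertice_verify
-- ===== SOURCE A (Python) =====
-- import copy
--
-- def vertice_verify(witness,number):
--     wit = copy.deepcopy(witness)
--     count = 0
--     while count <= number - 1:
--         try:
--             wit.remove(count)
--         except ValueError:
--             return False
--         count += 1
--     if len(wit) == 0:
--         return True
--     else:
--         return False
-- ===== SOURCE B (Python) =====
-- def vertice_verify(witness, number):
--     if len(witness) != max(number, 0):
--         return False
--     return sorted(witness) == list(range(len(witness)))
-- ===== Notes on version B (the rewrite author's own statement) =====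
-- stated objective: faster
-- what changed: Replaces the per-value destructive list.remove loop over a deep copy with a length guard plus one sort and a single linear equality comparison against range(len(witness)).
import Mathlib
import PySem

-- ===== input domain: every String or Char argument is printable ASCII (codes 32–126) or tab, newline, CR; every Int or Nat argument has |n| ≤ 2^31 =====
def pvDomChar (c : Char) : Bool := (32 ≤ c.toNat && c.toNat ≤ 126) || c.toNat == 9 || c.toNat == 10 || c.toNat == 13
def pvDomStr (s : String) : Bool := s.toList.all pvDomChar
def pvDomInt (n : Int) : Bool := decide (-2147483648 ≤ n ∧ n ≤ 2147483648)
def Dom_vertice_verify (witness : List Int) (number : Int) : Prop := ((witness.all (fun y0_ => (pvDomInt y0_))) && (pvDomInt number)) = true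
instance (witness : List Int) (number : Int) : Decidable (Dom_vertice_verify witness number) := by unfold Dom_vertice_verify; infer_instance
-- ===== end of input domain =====

-- B replaces A's per-value destructive list.remove loop with one sort plus a single
-- equality comparison against range(number) (objective: faster).

-- ===== PORT A =====
-- while count <= number - 1: wit.remove(count) (ValueError → False); count += 1
-- fuel = number.toNat = number of iterations of the while loop
def verticeLoopA : Nat → Int → List Int → Bool
  | 0, _, wit => wit.length == 0
  | k+1, count, wit =>
    match PySem.List.remove? wit count with
    | none => false
    | some w => verticeLoopA k (count + 1) w

def vertice_verify (witness : List Int) (number : Int) : Bool :=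
  verticeLoopA number.toNat 0 witness

-- ===== PORT B =====
def vertice_verify_alt (witness : List Int) (number : Int) : Bool :=
  if (witness.length : Int) ≠ max number 0 then false
  else PySem.List.sorted witness id false == PySem.List.pyRange 0 (witness.length : Int) 1

-- ===== PRECONDITION & SPEC =====
def Spec_vertice_verify (witness : List Int) (number : Int) (out : Bool) : Prop := out = vertice_verify_alt witness number
instance (witness : List Int) (number : Int) (out : Bool) : Decidable (Spec_vertice_verify witness number out) := by unfold Spec_vertice_verify; infer_instance

-- ===== CLAIM (what is proved, stated in full; the proofs are below) =====
def Claim_equal_vertice_verify : Prop := ∀ (witness : List Int) (number : Int), Dom_vertice_verify witness number → Spec_vertice_verify witness number (vertice_verify witness number)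

-- ===== LEMMAS AND PROOFS =====

-- A's loop succeeds iff the working list is a permutation of [c, c+k)
theorem verticeLoopA_iff_perm (k : Nat) (c : Int) (wit : List Int) :
    verticeLoopA k c wit = true ↔ wit.Perm (PySem.List.pyRange c (c + k) 1) := by
  induction k generalizing c wit with
  | zero =>
    rw [PySem.List.pyRange_one_eq_nil (by omega : c + ((0:Nat):Int) ≤ c)]
    simp [verticeLoopA, List.length_eq_zero_iff, List.perm_nil]
  | succ k ih =>
    have hcast : (((k+1 : Nat)) : Int) = (k : Int) + 1 := by push_cast; ring
    rw [hcast, PySem.List.pyRange_one_cons (by omega : c < c + ((k:Int) + 1))]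
    simp only [verticeLoopA]
    cases hrem : PySem.List.remove? wit c with
    | none =>
      have hc : c ∉ wit := (PySem.List.remove?_eq_none_iff wit c).mp hrem
      simp only [Bool.false_eq_true, false_iff]
      intro hp
      exact hc (hp.mem_iff.mpr (List.mem_cons_self))
    | some w =>
      have hc : c ∈ wit := by
        by_contra h
        rw [(PySem.List.remove?_eq_none_iff wit c).mpr h] at hrem
        simp at hrem
      have hw : w = wit.erase c := by
        have := PySem.List.remove?_eq_some_erase (xs := wit) (v := c) hc
        rw [this] at hrem; exact (Option.some.inj hrem).symm
      subst hw
      rw [ih]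
      have hper : wit.Perm (c :: wit.erase c) := List.perm_cons_erase hc
      have harith : (c + 1) + (k:Int) = c + ((k:Int) + 1) := by ring
      rw [harith]
      constructor
      · intro h
        exact hper.trans (h.cons c)
      · intro h
        exact (hper.symm.trans h).cons_inv

-- B succeeds iff witness is a permutation of [0, number)
theorem alt_iff_perm (witness : List Int) (number : Int) :
    vertice_verify_alt witness number = true ↔ witness.Perm (PySem.List.pyRange 0 number 1) := by
  unfold vertice_verify_alt
  have hlen : (PySem.List.pyRange 0 number 1).length = number.toNat := by
    rw [PySem.List.length_pyRange_one]; omega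
  split_ifs with h
  · simp only [false_iff]
    intro hp
    have := hp.length_eq
    rw [hlen] at this
    omega
  · have hn : PySem.List.pyRange 0 ((witness.length : Nat) : Int) 1 = PySem.List.pyRange 0 number 1 := by
      by_cases h0 : 0 ≤ number
      · have : ((witness.length : Nat) : Int) = number := by omega
        rw [this]
      · rw [PySem.List.pyRange_one_eq_nil (by omega), PySem.List.pyRange_one_eq_nil (by omega)]
    rw [beq_iff_eq, hn]
    constructor
    · intro h
      exact (h ▸ (PySem.List.sorted_perm witness id false)).symm
    · intro h
      exact PySem.List.sorted_eq_of_perm_of_pairwise_lt witness _ id h.symm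
        (PySem.List.pairwise_lt_pyRange_one 0 number)

theorem range_toNat (number : Int) :
    PySem.List.pyRange 0 ((number.toNat : Int)) 1 = PySem.List.pyRange 0 number 1 := by
  by_cases h : 0 ≤ number
  · rw [Int.toNat_of_nonneg h]
  · rw [PySem.List.pyRange_one_eq_nil (by omega), PySem.List.pyRange_one_eq_nil (by omega)]

-- ===== VERDICT (by name: the statement is the Claim_ definition above) =====
theorem vertice_verify_spec : Claim_equal_vertice_verify := by
  intro witness number _
  unfold Spec_vertice_verify
  rw [Bool.eq_iff_iff]
  rw [alt_iff_perm]
  have := verticeLoopA_iff_perm number.toNat 0 witness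
  rw [zero_add] at this
  unfold vertice_verify
  rw [this, range_toNat]
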